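-- pv_equiv track=rewrite | github.com/DiegoViera1511/AI-Hex-Game | player.py | count_bridges
-- ===== SOURCE A (Python) =====
-- adj = [(0,1),(0,-1),(1,-1),(1,0),(-1,1),(-1,0)]
--
-- def count_bridges(board, player_id):
--     size = len(board)
--     count = 0
--     for i in range(size):
--         for j in range(size):
--             if board[i][j] != player_id:
--                 continue
--             for mov in adj:
--                 next = (i+mov[0],j+mov[1])
--                 if next[0] < 0 or next[0] >= size:
--                     continue
--                 if next[1] < 0 or next[1] >= size:
--                     continue
--                 bouns = 0
--                 if player_id == 1 and next[0] == 0 or next[0] == size-1: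
--                     bouns = 5
--                 if player_id == 2 and next[1] == 0 or next[1] == size-1:
--                     bouns = 5
--                 if board[next[0]][next[1]] == player_id:
--                     count += 1
--
--     return count
-- ===== SOURCE B (Python) =====
-- def count_bridges(board, player_id):
--     n = len(board)
--     rows = [[row[j] for j in range(n)] for row in board]
--     c = 0
--     for row in rows:
--         c += sum(a == player_id == b for a, b in zip(row, row[1:]))
--     for up, dn in zip(rows, rows[1:]):
--         c += sum(a == player_id == b for a, b in zip(up, dn))
--         c += sum(a == player_id == b for a, b in zip(up[1:], dn))
--     return 2 * c
-- ===== Notes on version B (the rewrite author's own statement) =====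
-- stated objective: alternative
-- what changed: B replaces A's per-cell scan over a 6-offset adjacency table with a zip-based pass: it materialises the n first columns of each row, counts unordered adjacent same-player pairs by zipping each row with its own tail (horizontal) and consecutive rows in two alignments (the two diagonal directions), and returns twice that sum; A's dead 'bouns' branches disappear. Pre_ excludes ragged boards with a row shorter than len(board), on which both programs raise IndexError.
import Mathlib
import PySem

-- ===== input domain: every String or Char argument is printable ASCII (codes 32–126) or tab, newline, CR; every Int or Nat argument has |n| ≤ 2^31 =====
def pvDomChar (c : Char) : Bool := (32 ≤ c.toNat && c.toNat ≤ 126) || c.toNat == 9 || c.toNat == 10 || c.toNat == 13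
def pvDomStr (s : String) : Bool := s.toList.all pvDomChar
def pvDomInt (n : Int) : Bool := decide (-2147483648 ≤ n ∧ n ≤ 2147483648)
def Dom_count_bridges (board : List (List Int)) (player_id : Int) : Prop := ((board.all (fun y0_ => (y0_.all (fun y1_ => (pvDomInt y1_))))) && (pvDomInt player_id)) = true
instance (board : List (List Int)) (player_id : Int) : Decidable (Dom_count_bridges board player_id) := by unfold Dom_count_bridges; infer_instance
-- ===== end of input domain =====

-- B replaces A's index/offset scan by zipping: rows restricted to the first n columns, each row zipped with
-- its own tail (horizontal pairs) and consecutive rows zipped in two alignments (the two diagonal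
-- directions); twice that unordered-pair count equals A's ordered count. A's dead 'bouns' code is dropped.

-- ===== PORT A =====
def pvAdj : List (Int × Int) := [(0,1),(0,-1),(1,-1),(1,0),(-1,1),(-1,0)]

-- board[i][j]; 'continue'-style indexing, in range under Pre_ (defaults are never hit there)
def pvCell (board : List (List Int)) (i j : Int) : Int :=
  PySem.List.pyGetD (PySem.List.pyGetD board i []) j 0

def count_bridges (board : List (List Int)) (player_id : Int) : Int :=
  let size : Int := (board.length : Int)
  (PySem.List.pyRange 0 size 1).foldl (fun count i =>
    (PySem.List.pyRange 0 size 1).foldl (fun count j =>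
      if pvCell board i j ≠ player_id then count
      else pvAdj.foldl (fun count mov =>
        let nx := i + mov.1
        let ny := j + mov.2
        if nx < 0 ∨ nx ≥ size then count
        else if ny < 0 ∨ ny ≥ size then count
        else if pvCell board nx ny = player_id then count + 1 else count) count) count) 0

-- ===== PORT B =====
-- sum(a == player_id == b for a, b in zip(xs, ys))
def pvZipCount (p : Int) (xs ys : List Int) : Int :=
  ((xs.zip ys).map (fun q => if q.1 = p ∧ q.2 = p then (1:Int) else 0)).sum

def count_bridges_alt (board : List (List Int)) (player_id : Int) : Int :=
  let n : Int := (board.length : Int)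
  -- [[row[j] for j in range(n)] for row in board]; row[j] in range under Pre_
  let rows := board.map (fun row => (PySem.List.pyRange 0 n 1).map (fun j => PySem.List.pyGetD row j 0))
  let c1 := rows.foldl (fun c row =>
      c + pvZipCount player_id row (PySem.List.slice row (some 1) none)) 0
  let c2 := (rows.zip (PySem.List.slice rows (some 1) none)).foldl (fun c q =>
      c + pvZipCount player_id q.1 q.2
        + pvZipCount player_id (PySem.List.slice q.1 (some 1) none) q.2) c1
  2 * c2

-- ===== PRECONDITION & SPEC =====
-- Pre_ excludes ragged boards having a row shorter than len(board): there A raises IndexError.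
def Pre_count_bridges (board : List (List Int)) (player_id : Int) : Prop :=
  ∀ row ∈ board, board.length ≤ row.length

instance (board : List (List Int)) (player_id : Int) : Decidable (Pre_count_bridges board player_id) := by
  unfold Pre_count_bridges; infer_instance

def pvWitness_count_bridges : List (List Int) × Int := ([[1, 1], [0, 1]], 1)

def Spec_count_bridges (board : List (List Int)) (player_id : Int) (out : Int) : Prop := out = count_bridges_alt board player_id
instance (board : List (List Int)) (player_id : Int) (out : Int) : Decidable (Spec_count_bridges board player_id out) := by unfold Spec_count_bridges; infer_instance

-- ===== CLAIM (what is proved, stated in full; the proofs are below) =====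
def Claim_equal_count_bridges : Prop := ∀ (board : List (List Int)) (player_id : Int), Dom_count_bridges board player_id → Pre_count_bridges board player_id → Spec_count_bridges board player_id (count_bridges board player_id)

-- ===== LEMMAS AND PROOFS =====

-- the per-(cell, offset) indicator both counts are sums of
def pvHit (board : List (List Int)) (p : Int) (n i j a b : Int) : Int :=
  if pvCell board i j = p ∧ 0 ≤ i + a ∧ i + a < n ∧ 0 ≤ j + b ∧ j + b < n ∧
     pvCell board (i + a) (j + b) = p then 1 else 0

-- number of ordered same-player pairs at offset (a,b), as a sum over the grid
def pvS (board : List (List Int)) (p : Int) (m : ℕ) (a b : Int) : Int :=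
  ∑ q ∈ Finset.range m ×ˢ Finset.range m, pvHit board p m q.1 q.2 a b

-- same, with the target cell summed explicitly (fully symmetric form)
def pvT (board : List (List Int)) (p : Int) (m : ℕ) (a b : Int) : Int :=
  ∑ q ∈ (Finset.range m ×ˢ Finset.range m) ×ˢ (Finset.range m ×ˢ Finset.range m),
    if ((q.2.1 : Int) = q.1.1 + a ∧ (q.2.2 : Int) = q.1.2 + b ∧
        pvCell board q.1.1 q.1.2 = p ∧ pvCell board q.2.1 q.2.2 = p) then 1 else 0

-- cell read with ℕ indices (what B's zips see)
def pvNCell (board : List (List Int)) (i j : ℕ) : Int := (board.getD i []).getD j 0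

lemma pvCell_cast (board : List (List Int)) (i j : ℕ) :
    pvCell board (i:ℤ) (j:ℤ) = pvNCell board i j := by
  simp [pvCell, pvNCell]

lemma pv_foldl_shift {α : Type} (l : List α) (f : Int → α → Int) (h : α → Int)
    (H : ∀ c x, f c x = c + h x) (c : Int) : l.foldl f c = c + (l.map h).sum := by
  have : f = fun c x => c + h x := funext fun c => funext fun x => H c x
  subst this
  exact PySem.List.foldl_add l h c

lemma pv_sum_map_range (f : ℕ → Int) (m : ℕ) :
    ((List.range m).map f).sum = ∑ k ∈ Finset.range m, f k := by
  induction m with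
  | zero => simp
  | succ m ih => simp [List.range_succ, Finset.sum_range_succ, ih]

-- sum of a map over a list, as a Finset.range sum over indices
lemma pvL1 {α : Type} (l : List α) (f : α → Int) (d : α) :
    (l.map f).sum = ∑ i ∈ Finset.range l.length, f (l.getD i d) := by
  induction l with
  | nil => simp
  | cons a l ih => simp [Finset.sum_range_succ', ih]; omega

-- pvZipCount as an index sum
lemma pvL2 (p : Int) (xs ys : List Int) :
    pvZipCount p xs ys
      = ∑ k ∈ Finset.range (min xs.length ys.length),
          (if xs.getD k 0 = p ∧ ys.getD k 0 = p then (1:Int) else 0) := by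
  induction xs generalizing ys with
  | nil => simp [pvZipCount]
  | cons x xs ih =>
    cases ys with
    | nil => simp [pvZipCount]
    | cons y ys =>
      have hx : pvZipCount p (x :: xs) (y :: ys)
          = (if x = p ∧ y = p then (1:Int) else 0) + pvZipCount p xs ys := by
        simp [pvZipCount]
      rw [hx, ih ys]
      rw [show min (x :: xs).length (y :: ys).length = min xs.length ys.length + 1 by
        simp [Nat.succ_min_succ]]
      rw [Finset.sum_range_succ']
      simp
      omega

-- drop the j+1 < m guard by shortening the range
lemma pvL3 (m : ℕ) (g : ℕ → Int) :
    (∑ j ∈ Finset.range m, if j + 1 < m then g j else 0) = ∑ j ∈ Finset.range (m-1), g j := by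
  cases m with
  | zero => simp
  | succ K =>
    rw [Finset.sum_range_succ]
    simp only [Nat.succ_sub_one]
    rw [if_neg (by omega)]
    rw [add_zero]
    refine Finset.sum_congr rfl ?_
    intro j hj
    simp only [Finset.mem_range] at hj
    exact if_pos (by omega)

-- drop the 1 ≤ j guard by shifting the index
lemma pvL4 (m : ℕ) (g : ℕ → Int) :
    (∑ j ∈ Finset.range m, if 1 ≤ j then g j else 0) = ∑ k ∈ Finset.range (m-1), g (k+1) := by
  cases m with
  | zero => simp
  | succ K =>
    rw [Finset.sum_range_succ']
    simp only [Nat.succ_sub_one]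
    rw [if_neg (by omega), add_zero]
    refine Finset.sum_congr rfl ?_
    intro k _
    exact if_pos (by omega)

lemma pvTailGetD (l : List Int) (k : ℕ) : l.tail.getD k 0 = l.getD (k+1) 0 := by
  cases l <;> simp

-- per-offset characterizations of pvHit on ℕ indices
lemma pvHit01 (board : List (List Int)) (p : Int) (m : ℕ) (i j : ℕ) (hi : i < m) :
    pvHit board p m i j 0 1
      = if j + 1 < m then
          (if pvNCell board i j = p ∧ pvNCell board i (j+1) = p then (1:Int) else 0) else 0 := by
  unfold pvHit
  by_cases hjm : j + 1 < m
  · rw [if_pos hjm]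
    refine if_congr ?_ rfl rfl
    rw [show (i:ℤ) + 0 = ((i:ℕ):ℤ) by ring, show (j:ℤ) + 1 = (((j+1:ℕ)):ℤ) by push_cast; ring,
        pvCell_cast, pvCell_cast]
    constructor
    · rintro ⟨h1, _, _, _, _, h2⟩; exact ⟨h1, h2⟩
    · rintro ⟨h1, h2⟩
      exact ⟨h1, by omega, by omega, by omega, by omega, h2⟩
  · rw [if_neg hjm]
    refine if_neg ?_
    rintro ⟨_, _, _, _, h, _⟩
    omega

lemma pvHit10 (board : List (List Int)) (p : Int) (m : ℕ) (i j : ℕ) (hj : j < m) :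
    pvHit board p m i j 1 0
      = if i + 1 < m then
          (if pvNCell board i j = p ∧ pvNCell board (i+1) j = p then (1:Int) else 0) else 0 := by
  unfold pvHit
  by_cases him : i + 1 < m
  · rw [if_pos him]
    refine if_congr ?_ rfl rfl
    rw [show (j:ℤ) + 0 = ((j:ℕ):ℤ) by ring, show (i:ℤ) + 1 = (((i+1:ℕ)):ℤ) by push_cast; ring,
        pvCell_cast, pvCell_cast]
    constructor
    · rintro ⟨h1, _, _, _, _, h2⟩; exact ⟨h1, h2⟩
    · rintro ⟨h1, h2⟩
      exact ⟨h1, by omega, by omega, by omega, by omega, h2⟩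
  · rw [if_neg him]
    refine if_neg ?_
    rintro ⟨_, _, h, _, _, _⟩
    omega

lemma pvHit1m1 (board : List (List Int)) (p : Int) (m : ℕ) (i j : ℕ) (hj : j < m) :
    pvHit board p m i j 1 (-1)
      = if i + 1 < m ∧ 1 ≤ j then
          (if pvNCell board i j = p ∧ pvNCell board (i+1) (j-1) = p then (1:Int) else 0) else 0 := by
  unfold pvHit
  by_cases hc : i + 1 < m ∧ 1 ≤ j
  · rw [if_pos hc]
    obtain ⟨him, hj1⟩ := hc
    refine if_congr ?_ rfl rfl
    rw [show (i:ℤ) + 1 = (((i+1:ℕ)):ℤ) by push_cast; ring,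
        show (j:ℤ) + (-1) = (((j-1:ℕ)):ℤ) by omega, pvCell_cast, pvCell_cast]
    constructor
    · rintro ⟨h1, _, _, _, _, h2⟩; exact ⟨h1, h2⟩
    · rintro ⟨h1, h2⟩
      exact ⟨h1, by omega, by omega, by omega, by omega, h2⟩
  · rw [if_neg hc]
    refine if_neg ?_
    rintro ⟨_, _, h1, h2, _, _⟩
    exact hc ⟨by omega, by omega⟩

-- S-characterizations in ℕ-cell form
lemma pvS01_char (board : List (List Int)) (p : Int) (m : ℕ) :
    pvS board p m 0 1
      = ∑ i ∈ Finset.range m, ∑ k ∈ Finset.range (m-1),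
          (if pvNCell board i k = p ∧ pvNCell board i (k+1) = p then (1:Int) else 0) := by
  unfold pvS
  rw [Finset.sum_product]
  refine Finset.sum_congr rfl ?_
  intro i hi
  simp only [Finset.mem_range] at hi
  rw [← pvL3 m]
  refine Finset.sum_congr rfl ?_
  intro j hj
  exact pvHit01 board p m i j hi

lemma pvS10_char (board : List (List Int)) (p : Int) (m : ℕ) :
    pvS board p m 1 0
      = ∑ i ∈ Finset.range (m-1), ∑ j ∈ Finset.range m,
          (if pvNCell board i j = p ∧ pvNCell board (i+1) j = p then (1:Int) else 0) := by
  unfold pvS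
  rw [Finset.sum_product]
  rw [← pvL3 m]
  refine Finset.sum_congr rfl ?_
  intro i _
  rw [Finset.sum_congr rfl (fun j hj =>
        pvHit10 board p m i j (by simpa using (Finset.mem_range.mp hj)))]
  by_cases him : i + 1 < m <;> simp [him]

lemma pvS1m1_char (board : List (List Int)) (p : Int) (m : ℕ) :
    pvS board p m 1 (-1)
      = ∑ i ∈ Finset.range (m-1), ∑ k ∈ Finset.range (m-1),
          (if pvNCell board i (k+1) = p ∧ pvNCell board (i+1) k = p then (1:Int) else 0) := by
  unfold pvS
  rw [Finset.sum_product]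
  rw [← pvL3 m]
  refine Finset.sum_congr rfl ?_
  intro i _
  rw [Finset.sum_congr rfl (fun j hj =>
        pvHit1m1 board p m i j (by simpa using (Finset.mem_range.mp hj)))]
  by_cases him : i + 1 < m
  · simp only [him, true_and]
    rw [pvL4 m]
    refine Finset.sum_congr rfl ?_
    intro k _
    simp
  · simp [him]

-- ===== A as a sum of the six offset counts =====
lemma pv_double (m : ℕ) (F : Int → Int → Int → Int) (h : Int → Int → Int)
    (H : ∀ c i j, F c i j = c + h i j) :
    (PySem.List.pyRange 0 (m:ℤ) 1).foldl
      (fun c i => (PySem.List.pyRange 0 (m:ℤ) 1).foldl (fun c j => F c i j) c) 0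
    = ∑ i ∈ Finset.range m, ∑ j ∈ Finset.range m, h i j := by
  have hmid : ∀ (c i : Int),
      (PySem.List.pyRange 0 (m:ℤ) 1).foldl (fun c j => F c i j) c
        = c + ∑ j ∈ Finset.range m, h i (j:ℤ) := by
    intro c i
    rw [pv_foldl_shift _ _ (h i) (fun c j => H c i j) c]
    congr 1
    rw [PySem.List.pyRange_zero_natCast, List.map_map, pv_sum_map_range]
    rfl
  rw [pv_foldl_shift _ _ (fun i => ∑ j ∈ Finset.range m, h i (j:ℤ)) hmid 0]
  rw [PySem.List.pyRange_zero_natCast, List.map_map, pv_sum_map_range]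
  simp

lemma pvS_eq_T (board : List (List Int)) (p : Int) (m : ℕ) (a b : Int) :
    pvS board p m a b = pvT board p m a b := by
  unfold pvS pvT
  conv_rhs => rw [Finset.sum_product]
  refine Finset.sum_congr rfl ?_
  intro q1 hq1
  simp only [Finset.mem_product, Finset.mem_range] at hq1
  dsimp only
  symm
  by_cases hb : 0 ≤ (q1.1:ℤ) + a ∧ (q1.1:ℤ) + a < m ∧ 0 ≤ (q1.2:ℤ) + b ∧ (q1.2:ℤ) + b < m
  · obtain ⟨hb1, hb2, hb3, hb4⟩ := hb
    have hcalc : ∀ q2 : ℕ × ℕ,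
        (if ((q2.1 : Int) = q1.1 + a ∧ (q2.2 : Int) = q1.2 + b ∧
            pvCell board q1.1 q1.2 = p ∧ pvCell board q2.1 q2.2 = p) then (1:ℤ) else 0)
        = (if q2 = (((q1.1:ℤ) + a).toNat, ((q1.2:ℤ) + b).toNat) then
            (if pvCell board q1.1 q1.2 = p ∧ pvCell board ((q1.1:ℤ) + a) ((q1.2:ℤ) + b) = p then (1:ℤ) else 0) else 0) := by
      intro q2
      by_cases he : q2 = (((q1.1:ℤ) + a).toNat, ((q1.2:ℤ) + b).toNat)
      · subst he
        rw [if_pos rfl]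
        refine if_congr ?_ rfl rfl
        have e1 : ((((q1.1:ℤ) + a).toNat : ℤ)) = (q1.1:ℤ) + a := by omega
        have e2 : ((((q1.2:ℤ) + b).toNat : ℤ)) = (q1.2:ℤ) + b := by omega
        constructor
        · rintro ⟨_, _, h3, h4⟩
          exact ⟨h3, by rwa [e1, e2] at h4⟩
        · rintro ⟨h3, h4⟩
          exact ⟨e1, e2, h3, by rwa [e1, e2]⟩
      · rw [if_neg he]
        refine if_neg ?_
        rintro ⟨h1, h2, _, _⟩
        exact he (Prod.ext (by omega) (by omega))
    rw [Finset.sum_congr rfl fun q2 _ => hcalc q2,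
        Finset.sum_ite_eq' (Finset.range m ×ˢ Finset.range m)
          ((((q1.1:ℤ) + a).toNat, ((q1.2:ℤ) + b).toNat))
          (fun _ => if pvCell board q1.1 q1.2 = p ∧ pvCell board ((q1.1:ℤ) + a) ((q1.2:ℤ) + b) = p then (1:ℤ) else 0)]
    have hm : (((q1.1:ℤ) + a).toNat, ((q1.2:ℤ) + b).toNat) ∈ Finset.range m ×ˢ Finset.range m := by
      simp only [Finset.mem_product, Finset.mem_range]; omega
    rw [if_pos hm]
    unfold pvHit
    refine (if_congr ?_ rfl rfl).symm
    constructor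
    · rintro ⟨h1, _, _, _, _, h2⟩; exact ⟨h1, h2⟩
    · rintro ⟨h1, h2⟩; exact ⟨h1, hb1, hb2, hb3, hb4, h2⟩
  · have hz : ∀ q2 ∈ Finset.range m ×ˢ Finset.range m,
        (if ((q2.1 : Int) = q1.1 + a ∧ (q2.2 : Int) = q1.2 + b ∧
            pvCell board q1.1 q1.2 = p ∧ pvCell board q2.1 q2.2 = p) then (1:ℤ) else 0) = 0 := by
      intro q2 hq2
      simp only [Finset.mem_product, Finset.mem_range] at hq2
      refine if_neg ?_
      rintro ⟨h1, h2, _, _⟩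
      exact hb ⟨by omega, by omega, by omega, by omega⟩
    rw [Finset.sum_eq_zero hz]
    unfold pvHit
    refine (if_neg ?_).symm
    rintro ⟨_, h1, h2, h3, h4, _⟩
    exact hb ⟨h1, h2, h3, h4⟩

lemma pvT_symm (board : List (List Int)) (p : Int) (m : ℕ) (a b : Int) :
    pvT board p m a b = pvT board p m (-a) (-b) := by
  unfold pvT
  refine Finset.sum_nbij' Prod.swap Prod.swap ?_ ?_ ?_ ?_ ?_
  · intro q hq; simp [Finset.mem_product] at hq ⊢; tauto
  · intro q hq; simp [Finset.mem_product] at hq ⊢; tauto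
  · intro q _; rfl
  · intro q _; rfl
  · intro q _
    simp only [Prod.swap]
    refine if_congr ?_ rfl rfl
    constructor
    · rintro ⟨h1, h2, h3, h4⟩; exact ⟨by omega, by omega, h4, h3⟩
    · rintro ⟨h1, h2, h3, h4⟩; exact ⟨by omega, by omega, h4, h3⟩

lemma pvS_symm (board : List (List Int)) (p : Int) (m : ℕ) (a b : Int) :
    pvS board p m a b = pvS board p m (-a) (-b) := by
  rw [pvS_eq_T, pvT_symm, ← pvS_eq_T]

lemma pvA_eq_sum (board : List (List Int)) (p : Int) :
    count_bridges board p =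
      pvS board p board.length 0 1 + pvS board p board.length 0 (-1) +
      pvS board p board.length 1 (-1) + pvS board p board.length 1 0 +
      pvS board p board.length (-1) 1 + pvS board p board.length (-1) 0 := by
  unfold count_bridges
  dsimp only
  set m := board.length with hm
  have key : ∀ c (i j : Int),
      (if pvCell board i j ≠ p then c
       else pvAdj.foldl (fun c mov =>
         if i + mov.1 < 0 ∨ i + mov.1 ≥ (m:ℤ) then c
         else if j + mov.2 < 0 ∨ j + mov.2 ≥ (m:ℤ) then c
         else if pvCell board (i + mov.1) (j + mov.2) = p then c + 1 else c) c)
      = c + (pvAdj.map (fun mov => pvHit board p m i j mov.1 mov.2)).sum := by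
    intro c i j
    by_cases hc : pvCell board i j = p
    · rw [if_neg (by simpa using hc)]
      rw [pv_foldl_shift _ _
          (fun mov => if ¬(i + mov.1 < 0 ∨ i + mov.1 ≥ (m:ℤ)) ∧ ¬(j + mov.2 < 0 ∨ j + mov.2 ≥ (m:ℤ)) ∧
             pvCell board (i + mov.1) (j + mov.2) = p then (1:ℤ) else 0)
          (fun c mov => by dsimp only; split_ifs <;> omega) c]
      congr 1
      refine congrArg List.sum (List.map_congr_left ?_)
      intro mov _
      unfold pvHit
      refine if_congr ?_ rfl rfl
      constructor
      · rintro ⟨h1, h2, h5⟩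
        refine ⟨hc, ?_, ?_, ?_, ?_, h5⟩ <;> omega
      · rintro ⟨_, h1, h2, h3, h4, h5⟩
        exact ⟨by omega, by omega, h5⟩
    · rw [if_pos (by simpa using hc)]
      have : (pvAdj.map (fun mov => pvHit board p m i j mov.1 mov.2)).sum = 0 := by
        refine List.sum_eq_zero ?_
        intro x hx
        simp only [List.mem_map] at hx
        obtain ⟨mov, _, rfl⟩ := hx
        unfold pvHit
        exact if_neg (fun hco => hc hco.1)
      omega
  rw [pv_double m _ (fun i j => (pvAdj.map (fun mov => pvHit board p m i j mov.1 mov.2)).sum) key]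
  have expand : ∀ i j : Int, (pvAdj.map (fun mov => pvHit board p m i j mov.1 mov.2)).sum
      = pvHit board p m i j 0 1 + pvHit board p m i j 0 (-1) + pvHit board p m i j 1 (-1)
        + pvHit board p m i j 1 0 + pvHit board p m i j (-1) 1 + pvHit board p m i j (-1) 0 := by
    intro i j; simp [pvAdj]; ring
  simp only [expand]
  simp only [Finset.sum_add_distrib]
  unfold pvS
  simp [Finset.sum_product]

-- ===== B as a sum of the three zip counts =====
lemma pvZipGet {α : Type} (l : List α) (i : ℕ) (d : α) (h : i + 1 < l.length) :
    (l.zip l.tail).getD i (d, d) = (l.getD i d, l.getD (i+1) d) := by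
  have hzl : (l.zip l.tail).length = l.length - 1 := by
    rw [List.length_zip, List.length_tail]; omega
  have hi : i < (l.zip l.tail).length := by omega
  rw [List.getD_eq_getElem _ _ hi, List.getElem_zip,
      List.getD_eq_getElem _ _ (by omega : i < l.length),
      List.getD_eq_getElem _ _ (by omega : i + 1 < l.length)]
  congr 1
  exact List.getElem_tail ..

lemma pvRowEq (r : List Int) (m : ℕ) :
    (PySem.List.pyRange 0 (m:ℤ) 1).map (fun j => PySem.List.pyGetD r j 0)
      = (List.range m).map (fun j => r.getD j 0) := by
  rw [PySem.List.pyRange_zero_natCast, List.map_map]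
  refine List.map_congr_left ?_
  intro j _
  simp

lemma pvB_eq_sum (board : List (List Int)) (p : Int) :
    count_bridges_alt board p
      = 2 * (pvS board p board.length 0 1 + pvS board p board.length 1 (-1) +
             pvS board p board.length 1 0) := by
  rw [pvS01_char, pvS1m1_char, pvS10_char]
  unfold count_bridges_alt
  dsimp only
  simp only [PySem.List.slice_from_one]
  set m := board.length with hm
  set rows := board.map (fun r => (PySem.List.pyRange 0 (m:ℤ) 1).map (fun j => PySem.List.pyGetD r j 0)) with hrows
  have hlen : rows.length = m := by simp [hrows, hm]
  have hrget : ∀ i, i < m → rows.getD i [] = (List.range m).map (fun j => (board.getD i []).getD j 0) := by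
    intro i hi
    rw [List.getD_eq_getElem _ _ (by omega : i < rows.length),
        List.getD_eq_getElem _ _ (by omega : i < board.length)]
    simp only [hrows, List.getElem_map]
    exact pvRowEq _ m
  have hrowlen : ∀ i, i < m → (rows.getD i []).length = m := by
    intro i hi
    rw [hrget i hi]
    simp
  have hcellget : ∀ i k, i < m → k < m → (rows.getD i []).getD k 0 = pvNCell board i k := by
    intro i k hi hk
    rw [hrget i hi,
        List.getD_eq_getElem _ _ (by simp; omega : k < ((List.range m).map (fun j => (board.getD i []).getD j 0)).length),
        List.getElem_map]
    simp [pvNCell]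
  rw [pv_foldl_shift rows _ (fun row => pvZipCount p row row.tail) (fun c row => rfl) 0]
  rw [pv_foldl_shift (rows.zip rows.tail) _
      (fun q => pvZipCount p q.1 q.2 + pvZipCount p q.1.tail q.2)
      (fun c q => by dsimp only; ring) _]
  have h1 : (rows.map (fun row => pvZipCount p row row.tail)).sum
      = ∑ i ∈ Finset.range m, ∑ k ∈ Finset.range (m-1),
          (if pvNCell board i k = p ∧ pvNCell board i (k+1) = p then (1:Int) else 0) := by
    rw [pvL1 _ _ [], hlen]
    refine Finset.sum_congr rfl ?_
    intro i hi
    simp only [Finset.mem_range] at hi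
    rw [pvL2]
    have hR : (rows.getD i []).length = m := hrowlen i hi
    have htl : (rows.getD i []).tail.length = m - 1 := by rw [List.length_tail, hR]
    rw [hR, htl, show min m (m-1) = m - 1 by omega]
    refine Finset.sum_congr rfl ?_
    intro k hk
    simp only [Finset.mem_range] at hk
    rw [pvTailGetD, hcellget i k hi (by omega), hcellget i (k+1) hi (by omega)]
  have h2 : ((rows.zip rows.tail).map
        (fun q => pvZipCount p q.1 q.2 + pvZipCount p q.1.tail q.2)).sum
      = (∑ i ∈ Finset.range (m-1), ∑ k ∈ Finset.range (m-1),
          (if pvNCell board i (k+1) = p ∧ pvNCell board (i+1) k = p then (1:Int) else 0))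
      + (∑ i ∈ Finset.range (m-1), ∑ j ∈ Finset.range m,
          (if pvNCell board i j = p ∧ pvNCell board (i+1) j = p then (1:Int) else 0)) := by
    rw [pvL1 _ _ ([], [])]
    have hzl : (rows.zip rows.tail).length = m - 1 := by
      rw [List.length_zip, List.length_tail, hlen]; omega
    rw [hzl]
    rw [← Finset.sum_add_distrib]
    refine Finset.sum_congr rfl ?_
    intro i hi
    simp only [Finset.mem_range] at hi
    rw [pvZipGet rows i [] (by omega)]
    dsimp only
    have hRi : (rows.getD i []).length = m := hrowlen i (by omega)
    have hRi1 : (rows.getD (i+1) []).length = m := hrowlen (i+1) (by omega)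
    rw [pvL2, pvL2]
    have htl : (rows.getD i []).tail.length = m - 1 := by rw [List.length_tail, hRi]
    rw [hRi, hRi1, htl, min_self, show min (m-1) m = m - 1 by omega]
    rw [add_comm]
    congr 1
    · refine Finset.sum_congr rfl ?_
      intro k hk
      simp only [Finset.mem_range] at hk
      rw [pvTailGetD, hcellget i (k+1) (by omega) (by omega),
          hcellget (i+1) k (by omega) (by omega)]
    · refine Finset.sum_congr rfl ?_
      intro j hj
      simp only [Finset.mem_range] at hj
      rw [hcellget i j (by omega) hj, hcellget (i+1) j (by omega) hj]
  rw [h1, h2]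
  ring

-- ===== VERDICT (by name: the statement is the Claim_ definition above) =====
theorem count_bridges_spec : Claim_equal_count_bridges := by
  intro board p _ hpre
  show count_bridges board p = count_bridges_alt board p
  rw [pvA_eq_sum, pvB_eq_sum board p]
  have h1 := pvS_symm board p board.length 0 (-1)
  have h2 := pvS_symm board p board.length (-1) 1
  have h3 := pvS_symm board p board.length (-1) 0
  norm_num at h1 h2 h3
  rw [h1, h2, h3]; ring
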